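-- pv_equiv track=rewrite | github.com/arusse13/POPI_practical_exam | function.py | shortest_continuous_segment
-- ===== SOURCE A (Python) =====
-- def shortest_continuous_segment(s):
--     occ_set=set(s)
--     occ_list=[]
--
--     for num in occ_set:
--         occ_count = 0
--         for i in range(0,len(s)):
--             if s[i] == num and i != len(s)-1:
--                 occ_count += 1
--             elif s[i] != num and occ_count!=0:
--                 occ_list.append((num, occ_count))
--                 occ_count=0
--             elif s[i] == num and i == len(s)-1:
--                 occ_count += 1
--                 occ_list.append((num, occ_count))
--
--     min_occur=occ_list[0][1]
--     max_num=occ_list[0][0]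
--
--     for x in occ_list:
--         if x[1]<min_occur:
--             min_occur=x[1]
--             max_num=x[0]
--
--     for x in occ_list:
--         if x[1] == min_occur and x[0]>max_num:
--             max_num=x[0]
--
--     result = (max_num,min_occur)
--
--     return result
-- ===== SOURCE B (Python) =====
-- def shortest_continuous_segment(s):
--     # one pass: collect all maximal runs, then pick min length, max value on ties
--     runs = []
--     for x in s:
--         if runs and runs[-1][0] == x:
--             runs[-1] = (x, runs[-1][1] + 1)
--         else:
--             runs.append((x, 1))
--     best_len = min(l for _, l in runs)
--     best_val = max(v for v, l in runs if l == best_len)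
--     return (best_val, best_len)
-- ===== Notes on version B (the rewrite author's own statement) =====
-- stated objective: faster
-- what changed: B collects all maximal runs in a single left-to-right pass and then takes min length with max-value tie-break, instead of A's rescan of the whole list once per distinct value plus two extra selection passes.
import Mathlib
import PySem

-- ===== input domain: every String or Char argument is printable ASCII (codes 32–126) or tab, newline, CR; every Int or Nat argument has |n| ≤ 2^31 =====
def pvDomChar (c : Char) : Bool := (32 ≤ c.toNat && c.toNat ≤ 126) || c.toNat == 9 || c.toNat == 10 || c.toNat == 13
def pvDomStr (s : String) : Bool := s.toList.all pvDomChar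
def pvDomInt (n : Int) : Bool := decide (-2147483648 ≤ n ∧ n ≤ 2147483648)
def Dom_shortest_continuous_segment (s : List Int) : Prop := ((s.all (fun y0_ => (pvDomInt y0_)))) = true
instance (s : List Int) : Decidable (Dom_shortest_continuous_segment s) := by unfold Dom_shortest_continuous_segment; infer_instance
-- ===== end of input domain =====

-- B is a single pass over the maximal runs instead of A's rescan per distinct value; equivalence proved on nonempty lists (both raise on []).

-- ===== PORT A =====
-- one iteration of A's inner 'for i in range(len(s))' loop (L = len(s)-1, the last index)
def aInnerStep (num L : Int) (st : Int × List (Int × Int)) (p : Int × Int) : Int × List (Int × Int) :=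
  if p.2 = num ∧ p.1 ≠ L then (st.1 + 1, st.2)
  else if p.2 ≠ num ∧ st.1 ≠ 0 then (0, st.2 ++ [(num, st.1)])
  else if p.2 = num ∧ p.1 = L then (st.1 + 1, st.2 ++ [(num, st.1 + 1)])
  else st

-- occ_list after the outer 'for num in occ_set' loop (its final content, and hence A's
-- result, does not depend on the set's iteration order — proved below)
def aOccList (s : List Int) : List (Int × Int) :=
  (PySem.Set.ofList s).foldl
    (fun acc num => ((PySem.List.enumerate s 0).foldl (aInnerStep num ((s.length : Int) - 1)) (0, acc)).2) []

def shortest_continuous_segment (s : List Int) : Int × Int :=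
  match aOccList s with
  | [] => (0, 0)  -- Python raises IndexError on occ_list[0] here (s = []); excluded by Pre_
  | p0 :: _ =>
    let occ_list := aOccList s
    let st : Int × Int := occ_list.foldl (fun mm x => if x.2 < mm.1 then (x.2, x.1) else mm) (p0.2, p0.1)
    let maxNum : Int := occ_list.foldl (fun (mn : Int) x => if x.2 = st.1 ∧ x.1 > mn then x.1 else mn) st.2
    (maxNum, st.1)

-- ===== PORT B =====
-- one iteration of Source B's run-building loop (runs[-1] update / append)
def bStep (runs : List (Int × Int)) (x : Int) : List (Int × Int) :=
  match runs.getLast? with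
  | some (v, c) => if v = x then runs.dropLast ++ [(x, c + 1)] else runs ++ [(x, 1)]
  | none => [(x, 1)]

def bRuns (s : List Int) : List (Int × Int) := s.foldl bStep []

def shortest_continuous_segment_alt (s : List Int) : Int × Int :=
  let runs := bRuns s
  match PySem.List.min? (runs.map (fun r => r.2)) (fun y => y) with
  | none => (0, 0)  -- Source B's min() raises ValueError here (s = []); excluded by Pre_
  | some bestLen =>
    let bestVal := (PySem.List.max? ((runs.filter (fun r => r.2 == bestLen)).map (fun r => r.1)) (fun y => y)).getD 0
    (bestVal, bestLen)

-- ===== PRECONDITION & SPEC =====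
-- both programs raise on the empty list (A: IndexError, B: ValueError)
def Pre_shortest_continuous_segment (s : List Int) : Prop := s ≠ []
instance (s : List Int) : Decidable (Pre_shortest_continuous_segment s) := by unfold Pre_shortest_continuous_segment; infer_instance
def pvWitness_shortest_continuous_segment : List Int := [3, 1, 1, 2]

def Spec_shortest_continuous_segment (s : List Int) (out : Int × Int) : Prop := out = shortest_continuous_segment_alt s
instance (s : List Int) (out : Int × Int) : Decidable (Spec_shortest_continuous_segment s out) := by unfold Spec_shortest_continuous_segment; infer_instance

-- ===== CLAIM (what is proved, stated in full; the proofs are below) =====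
def Claim_equal_shortest_continuous_segment : Prop := ∀ (s : List Int), Dom_shortest_continuous_segment s → Pre_shortest_continuous_segment s → Spec_shortest_continuous_segment s (shortest_continuous_segment s)

-- ===== LEMMAS AND PROOFS =====

-- canonical run decomposition: runsFrom v c s = remaining runs given an open run of v of length c
def runsFrom (v c : Int) : List Int → List (Int × Int)
  | [] => [(v, c)]
  | a :: t => if a = v then runsFrom v (c + 1) t else (v, c) :: runsFrom a 1 t

def runsList : List Int → List (Int × Int)
  | [] => []
  | x :: t => runsFrom x 1 t

-- structural model of A's inner loop (what it appends for a given num, from count cnt)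
def innerModel (num cnt : Int) : List Int → List (Int × Int)
  | [] => []
  | [x] => if x = num then [(num, cnt + 1)] else if cnt ≠ 0 then [(num, cnt)] else []
  | x :: y :: t =>
    if x = num then innerModel num (cnt + 1) (y :: t)
    else if cnt ≠ 0 then (num, cnt) :: innerModel num 0 (y :: t)
    else innerModel num 0 (y :: t)

lemma foldl_aInner (num : Int) : ∀ (s : List Int) (k cnt : Int) (acc : List (Int × Int)),
    ((PySem.List.enumerate s k).foldl (aInnerStep num (k + s.length - 1)) (cnt, acc)).2
      = acc ++ innerModel num cnt s := by
  intro s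
  induction s with
  | nil => intro k cnt acc; simp [PySem.List.enumerate_nil, innerModel]
  | cons a t ih =>
    intro k cnt acc
    rw [PySem.List.enumerate_cons]
    cases t with
    | nil =>
      have hL : k + (([a] : List Int).length : Int) - 1 = k := by simp
      rw [hL]
      simp only [PySem.List.enumerate_nil, List.foldl_cons, List.foldl_nil]
      by_cases ha : a = num
      · simp [aInnerStep, ha, innerModel]
      · by_cases hc : cnt = 0
        · simp [aInnerStep, ha, hc, innerModel]
        · simp [aInnerStep, ha, hc, innerModel]
    | cons y t' =>
      have hne : k ≠ k + (((a :: y :: t').length : Int)) - 1 := by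
        simp only [List.length_cons]; push_cast; omega
      have hLL : k + (((a :: y :: t').length : Int)) - 1 = (k + 1) + (((y :: t').length : Int)) - 1 := by
        simp only [List.length_cons]; push_cast; ring
      rw [List.foldl_cons]
      by_cases ha : a = num
      · have hstep : aInnerStep num (k + (((a :: y :: t').length : Int)) - 1) (cnt, acc) (k, a)
            = (cnt + 1, acc) := by
          simp only [aInnerStep, ha]
          have hne' : ¬(k = k + (((a :: y :: t').length : Int)) - 1) := hne
          simp only [List.length_cons] at hne'
          push_cast at hne'
          simp [hne']
        rw [hstep, hLL, ih (k + 1) (cnt + 1) acc]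
        simp [innerModel, ha]
      · by_cases hc : cnt = 0
        · have hstep : aInnerStep num (k + (((a :: y :: t').length : Int)) - 1) (cnt, acc) (k, a)
              = (cnt, acc) := by
            simp [aInnerStep, ha, hc]
          rw [hstep, hLL, ih (k + 1) cnt acc]
          simp [innerModel, ha, hc]
        · have hstep : aInnerStep num (k + (((a :: y :: t').length : Int)) - 1) (cnt, acc) (k, a)
              = (0, acc ++ [(num, cnt)]) := by
            simp [aInnerStep, ha, hc]
          rw [hstep, hLL, ih (k + 1) 0 (acc ++ [(num, cnt)])]
          simp [innerModel, ha, hc]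

lemma fold_bStep : ∀ (s : List Int) (acc : List (Int × Int)) (v c : Int),
    s.foldl bStep (acc ++ [(v, c)]) = acc ++ runsFrom v c s := by
  intro s
  induction s with
  | nil => intro acc v c; simp [runsFrom]
  | cons a t ih =>
    intro acc v c
    have hstep : bStep (acc ++ [(v, c)]) a =
        if a = v then acc ++ [(a, c + 1)] else (acc ++ [(v, c)]) ++ [(a, 1)] := by
      by_cases h : v = a
      · simp [bStep, h]
      · have h' : ¬a = v := fun h' => h h'.symm
        simp [bStep, h, h']
    by_cases h : a = v
    · rw [List.foldl_cons, hstep, if_pos h]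
      rw [show acc ++ [(a, c + 1)] = acc ++ [(a, c + 1)] from rfl, ih acc a (c + 1)]
      simp [runsFrom, h]
    · rw [List.foldl_cons, hstep, if_neg h, ih (acc ++ [(v, c)]) a 1]
      simp [runsFrom, h]

lemma bRuns_eq (s : List Int) : bRuns s = runsList s := by
  cases s with
  | nil => rfl
  | cons x t =>
    show (x :: t).foldl bStep [] = runsFrom x 1 t
    have : (x :: t).foldl bStep [] = t.foldl bStep ([] ++ [(x, 1)]) := by
      simp [bStep]
    rw [this, fold_bStep t [] x 1]
    simp

lemma innerModel_filter (num : Int) : ∀ (s : List Int),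
    (innerModel num 0 s = (runsList s).filter (fun q => decide (q.1 = num)))
    ∧ (∀ c, 0 < c → s ≠ [] → innerModel num c s = (runsFrom num c s).filter (fun q => decide (q.1 = num)))
    ∧ (∀ v c, v ≠ num → innerModel num 0 s = (runsFrom v c s).filter (fun q => decide (q.1 = num))) := by
  intro s
  induction s with
  | nil =>
    refine ⟨by simp [innerModel, runsList], fun c hc h => absurd rfl h, fun v c hv => ?_⟩
    simp [innerModel, runsFrom, hv]
  | cons x t ih =>
    obtain ⟨ih0, iha, ihb⟩ := ih
    have hhead : innerModel num 0 (x :: t) = (runsFrom x 1 t).filter (fun q => decide (q.1 = num)) := by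
      by_cases hx : x = num
      · subst hx
        cases t with
        | nil => simp [innerModel, runsFrom]
        | cons y t' => simpa [innerModel] using iha 1 one_pos (by simp)
      · cases t with
        | nil => simp [innerModel, runsFrom, hx]
        | cons y t' => simpa [innerModel, hx] using ihb x 1 hx
    refine ⟨by simpa [runsList] using hhead, fun c hc _ => ?_, fun v c hv => ?_⟩
    · -- part (a): open run of num with count c > 0
      by_cases hx : x = num
      · subst hx
        cases t with
        | nil => simp [innerModel, runsFrom]
        | cons y t' =>
          simpa [innerModel, runsFrom] using iha (c + 1) (by omega) (by simp)
      · cases t with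
        | nil => simp [innerModel, runsFrom, hx, hc.ne']
        | cons y t' =>
          have h1 := ihb x 1 hx
          simp only [innerModel, if_neg hx, if_pos (show c ≠ 0 by omega)]
          rw [show runsFrom num c (x :: y :: t') = (num, c) :: runsFrom x 1 (y :: t') from by
            simp [runsFrom, hx]]
          simp [h1]
    · -- part (b): open run of some v ≠ num
      by_cases hxv : x = v
      · have hxn : ¬(x = num) := fun h => hv (hxv ▸ h)
        cases t with
        | nil => simp [innerModel, runsFrom, hxv, hv]
        | cons y t' =>
          simp only [innerModel, if_neg hxn]
          rw [show runsFrom v c (x :: y :: t') = runsFrom v (c + 1) (y :: t') from by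
            simp [runsFrom, hxv]]
          simpa using ihb v (c + 1) hv
      · simp only [runsFrom, if_neg hxv, List.filter_cons, decide_eq_true_eq]
        rw [if_neg (by simpa using hv)]
        exact hhead

lemma innerModel_zero (num : Int) (s : List Int) :
    innerModel num 0 s = (runsList s).filter (fun q => decide (q.1 = num)) :=
  (innerModel_filter num s).1

lemma runsFrom_ne_nil (v c : Int) (s : List Int) : runsFrom v c s ≠ [] := by
  induction s generalizing v c with
  | nil => simp [runsFrom]
  | cons a t ih =>
    simp only [runsFrom]
    by_cases h : a = v
    · simpa [h] using ih v (c + 1)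
    · simp [h]

lemma runsFrom_fst_mem (v c : Int) : ∀ (s : List Int) (p : Int × Int), p ∈ runsFrom v c s → p.1 = v ∨ p.1 ∈ s := by
  intro s
  induction s generalizing v c with
  | nil => intro p hp; simp [runsFrom] at hp; simp [hp]
  | cons a t ih =>
    intro p hp
    simp only [runsFrom] at hp
    by_cases h : a = v
    · rw [if_pos h] at hp
      rcases ih v (c + 1) p hp with h1 | h1
      · exact Or.inl h1
      · exact Or.inr (List.mem_cons_of_mem _ h1)
    · rw [if_neg h] at hp
      rcases List.mem_cons.mp hp with h1 | h1
      · exact Or.inl (by simp [h1])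
      · rcases ih a 1 p h1 with h2 | h2
        · exact Or.inr (by simp [h2])
        · exact Or.inr (List.mem_cons_of_mem _ h2)

lemma mem_runsList_fst (s : List Int) (p : Int × Int) (hp : p ∈ runsList s) : p.1 ∈ s := by
  cases s with
  | nil => simp [runsList] at hp
  | cons x t =>
    rcases runsFrom_fst_mem x 1 t p hp with h | h
    · simp [h]
    · exact List.mem_cons_of_mem _ h

lemma aOccList_eq (s : List Int) :
    aOccList s = (PySem.Set.ofList s).flatMap
      (fun num => (runsList s).filter (fun q => decide (q.1 = num))) := by
  unfold aOccList
  have h : ∀ (acc : List (Int × Int)) (num : Int), num ∈ PySem.Set.ofList s →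
      ((fun acc num => ((PySem.List.enumerate s 0).foldl (aInnerStep num ((s.length : Int) - 1)) (0, acc)).2) acc num)
        = ((fun acc num => acc ++ (runsList s).filter (fun q => decide (q.1 = num))) acc num) := by
    intro acc num _
    have h1 := foldl_aInner num s 0 0 acc
    rw [show (0 : Int) + (s.length : Int) - 1 = (s.length : Int) - 1 from by ring] at h1
    simpa [innerModel_zero] using h1
  rw [PySem.List.foldl_congr_mem (PySem.Set.ofList s) _ _ [] (fun acc num hnum => h acc num hnum),
    PySem.List.foldl_append_eq_flatMap]
  simp

lemma mem_aOccList (s : List Int) (p : Int × Int) : p ∈ aOccList s ↔ p ∈ runsList s := by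
  rw [aOccList_eq]
  simp only [List.mem_flatMap, List.mem_filter, decide_eq_true_eq]
  constructor
  · rintro ⟨num, _, hp, _⟩; exact hp
  · intro hp
    exact ⟨p.1, (PySem.Set.mem_ofList _ _).mpr (mem_runsList_fst s p hp), hp, rfl⟩

lemma aOccList_ne_nil (s : List Int) (hs : s ≠ []) : aOccList s ≠ [] := by
  cases s with
  | nil => exact absurd rfl hs
  | cons x t =>
    obtain ⟨p, hp⟩ := List.exists_mem_of_ne_nil _ (runsFrom_ne_nil x 1 t)
    exact List.ne_nil_of_mem ((mem_aOccList (x :: t) p).mpr hp)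

lemma loop1_spec : ∀ (l : List (Int × Int)) (m0 n0 : Int),
    (l.foldl (fun mm x => if x.2 < mm.1 then (x.2, x.1) else mm) (m0, n0)).1 ≤ m0
    ∧ (∀ q ∈ l, (l.foldl (fun mm x => if x.2 < mm.1 then (x.2, x.1) else mm) (m0, n0)).1 ≤ q.2)
    ∧ (l.foldl (fun mm x => if x.2 < mm.1 then (x.2, x.1) else mm) (m0, n0) = (m0, n0)
       ∨ ∃ q ∈ l, l.foldl (fun mm x => if x.2 < mm.1 then (x.2, x.1) else mm) (m0, n0) = (q.2, q.1)) := by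
  intro l
  induction l with
  | nil => intro m0 n0; simp
  | cons x t ih =>
    intro m0 n0
    by_cases hx : x.2 < m0
    · obtain ⟨h1, h2, h3⟩ := ih x.2 x.1
      rw [List.foldl_cons]
      simp only [if_pos hx]
      refine ⟨le_trans h1 (le_of_lt hx), ?_, ?_⟩
      · intro q hq
        rcases List.mem_cons.mp hq with h | h
        · exact h ▸ h1
        · exact h2 q h
      · rcases h3 with h | ⟨q, hq, h⟩
        · exact Or.inr ⟨x, List.mem_cons_self, h⟩
        · exact Or.inr ⟨q, List.mem_cons_of_mem _ hq, h⟩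
    · obtain ⟨h1, h2, h3⟩ := ih m0 n0
      rw [List.foldl_cons]
      simp only [if_neg hx]
      refine ⟨h1, ?_, ?_⟩
      · intro q hq
        rcases List.mem_cons.mp hq with h | h
        · exact h ▸ le_trans h1 (le_of_not_gt hx)
        · exact h2 q h
      · rcases h3 with h | ⟨q, hq, h⟩
        · exact Or.inl h
        · exact Or.inr ⟨q, List.mem_cons_of_mem _ hq, h⟩

lemma loop2_spec (k : Int) : ∀ (l : List (Int × Int)) (m0 : Int),
    m0 ≤ l.foldl (fun mn x => if x.2 = k ∧ x.1 > mn then x.1 else mn) m0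
    ∧ (∀ q ∈ l, q.2 = k → q.1 ≤ l.foldl (fun mn x => if x.2 = k ∧ x.1 > mn then x.1 else mn) m0)
    ∧ (l.foldl (fun mn x => if x.2 = k ∧ x.1 > mn then x.1 else mn) m0 = m0
       ∨ ∃ q ∈ l, q.2 = k ∧ q.1 = l.foldl (fun mn x => if x.2 = k ∧ x.1 > mn then x.1 else mn) m0) := by
  intro l
  induction l with
  | nil => intro m0; simp
  | cons x t ih =>
    intro m0
    rw [List.foldl_cons]
    by_cases hx : x.2 = k ∧ x.1 > m0
    · obtain ⟨h1, h2, h3⟩ := ih x.1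
      simp only [if_pos hx]
      refine ⟨le_trans (le_of_lt hx.2) h1, ?_, ?_⟩
      · intro q hq hqk
        rcases List.mem_cons.mp hq with h | h
        · exact h ▸ h1
        · exact h2 q h hqk
      · rcases h3 with h | ⟨q, hq, hqk, h⟩
        · exact Or.inr ⟨x, List.mem_cons_self, hx.1, h.symm⟩
        · exact Or.inr ⟨q, List.mem_cons_of_mem _ hq, hqk, h⟩
    · obtain ⟨h1, h2, h3⟩ := ih m0
      simp only [if_neg hx]
      refine ⟨h1, ?_, ?_⟩
      · intro q hq hqk
        rcases List.mem_cons.mp hq with h | h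
        · subst h
          have : ¬q.1 > m0 := fun hgt => hx ⟨hqk, hgt⟩
          exact le_trans (le_of_not_gt this) h1
        · exact h2 q h hqk
      · rcases h3 with h | ⟨q, hq, hqk, h⟩
        · exact Or.inl h
        · exact Or.inr ⟨q, List.mem_cons_of_mem _ hq, hqk, h⟩

-- characterization of the selected pair: (max value among runs of minimal length, minimal length)
def selChar (l : List (Int × Int)) (o : Int × Int) : Prop :=
  (∀ q ∈ l, o.2 ≤ q.2) ∧ (∃ q ∈ l, q.2 = o.2 ∧ q.1 = o.1) ∧ (∀ q ∈ l, q.2 = o.2 → q.1 ≤ o.1)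

lemma selChar_unique {l : List (Int × Int)} {o1 o2 : Int × Int} (h1 : selChar l o1) (h2 : selChar l o2) : o1 = o2 := by
  obtain ⟨hmin1, ⟨q1, hq1, hq1l, hq1v⟩, hmax1⟩ := h1
  obtain ⟨hmin2, ⟨q2, hq2, hq2l, hq2v⟩, hmax2⟩ := h2
  have hl : o1.2 = o2.2 :=
    le_antisymm (hq2l ▸ hmin1 q2 hq2) (hq1l ▸ hmin2 q1 hq1)
  have hv : o1.1 = o2.1 :=
    le_antisymm (hq1v ▸ hmax2 q1 hq1 (hl ▸ hq1l)) (hq2v ▸ hmax1 q2 hq2 (hl ▸ hq2l))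
  exact Prod.ext hv hl

lemma selChar_congr {l l' : List (Int × Int)} {o : Int × Int} (h : ∀ q, q ∈ l ↔ q ∈ l') (h1 : selChar l o) : selChar l' o := by
  obtain ⟨hmin, ⟨q, hq, hql, hqv⟩, hmax⟩ := h1
  exact ⟨fun q hq => hmin q ((h q).mpr hq), ⟨q, (h q).mp hq, hql, hqv⟩,
    fun q hq => hmax q ((h q).mpr hq)⟩

lemma selA (s : List Int) (hs : s ≠ []) : selChar (runsList s) (shortest_continuous_segment s) := by
  have hne := aOccList_ne_nil s hs
  apply selChar_congr (mem_aOccList s)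
  cases heq : aOccList s with
  | nil => exact absurd heq hne
  | cons p0 rest =>
    simp only [shortest_continuous_segment, heq]
    obtain ⟨ha1, ha2, ha3⟩ := loop1_spec (p0 :: rest) p0.2 p0.1
    set st := (p0 :: rest).foldl (fun mm x => if x.2 < mm.1 then (x.2, x.1) else mm) (p0.2, p0.1) with hst
    obtain ⟨hb1, hb2, hb3⟩ := loop2_spec st.1 (p0 :: rest) st.2
    set M := (p0 :: rest).foldl (fun mn x => if x.2 = st.1 ∧ x.1 > mn then x.1 else mn) st.2 with hM
    have hwit : ∃ q ∈ p0 :: rest, q.2 = st.1 ∧ q.1 = st.2 := by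
      rcases ha3 with h | ⟨q, hq, h⟩
      · exact ⟨p0, List.mem_cons_self, by rw [h], by rw [h]⟩
      · exact ⟨q, hq, by rw [h], by rw [h]⟩
    refine ⟨ha2, ?_, hb2⟩
    show ∃ q ∈ p0 :: rest, q.2 = st.1 ∧ q.1 = M
    rcases hb3 with h | ⟨q, hq, hqk, hqv⟩
    · obtain ⟨q, hq, hqk, hqv⟩ := hwit
      exact ⟨q, hq, hqk, by rw [hqv, h]⟩
    · exact ⟨q, hq, hqk, hqv⟩

lemma selB (s : List Int) (hs : s ≠ []) : selChar (runsList s) (shortest_continuous_segment_alt s) := by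
  have hrne : runsList s ≠ [] := by
    cases s with
    | nil => exact absurd rfl hs
    | cons x t => exact runsFrom_ne_nil x 1 t
  simp only [shortest_continuous_segment_alt, bRuns_eq]
  cases hm : PySem.List.min? ((runsList s).map (fun r => r.2)) (fun y => y) with
  | none =>
    exact absurd ((PySem.List.min?_eq_none_iff _ _).mp hm) (by simpa using hrne)
  | some bl =>
    show selChar (runsList s)
      ((PySem.List.max? (((runsList s).filter (fun r => r.2 == bl)).map (fun r => r.1)) (fun y => y)).getD 0, bl)
    have hblmem := PySem.List.min?_mem hm
    obtain ⟨q, hq, hq2⟩ := List.mem_map.mp hblmem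
    have hmin := PySem.List.min?_isMin hm
    have hqfl : q.1 ∈ (((runsList s).filter (fun r => r.2 == bl)).map (fun r => r.1)) :=
      List.mem_map_of_mem (List.mem_filter.mpr ⟨hq, by simp [hq2]⟩)
    cases hM : PySem.List.max? (((runsList s).filter (fun r => r.2 == bl)).map (fun r => r.1)) (fun y => y) with
    | none =>
      exact absurd ((PySem.List.max?_eq_none_iff _ _).mp hM) (List.ne_nil_of_mem hqfl)
    | some bv =>
      simp only [Option.getD_some]
      have hbvmem := PySem.List.max?_mem hM
      obtain ⟨q', hq'f, hq'1⟩ := List.mem_map.mp hbvmem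
      have hq'filter := List.mem_filter.mp hq'f
      have hmax := PySem.List.max?_isMax hM
      refine ⟨?_, ⟨q', hq'filter.1, by simpa using hq'filter.2, by simpa using hq'1⟩, ?_⟩
      · intro r hr
        simpa using hmin r.2 (List.mem_map_of_mem hr)
      · intro r hr hr2
        simpa using hmax r.1 (List.mem_map_of_mem (List.mem_filter.mpr ⟨hr, by simp [hr2]⟩))

-- ===== VERDICT (by name: the statement is the Claim_ definition above) =====
theorem shortest_continuous_segment_spec : Claim_equal_shortest_continuous_segment := by
  intro s _ hs
  unfold Spec_shortest_continuous_segment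
  exact selChar_unique (selA s hs) (selB s hs)
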